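-- pv_equiv track=rewrite | github.com/thejasmeetsingh/coding_ninjas | priority_queues/buy_the_ticket.py | buyTicket
-- ===== SOURCE A (Python) =====
-- import queue
-- import heapq
--
-- def buyTicket(arr, n, k):
--     if not arr:
--         return 0
--
--     pq = []
--     q = queue.Queue()
--
--     for i in range(n):
--         heapq.heappush(pq, arr[i])
--         heapq._heapify_max(pq)
--         q.put([i, arr[i]])
--
--     time = 0
--
--     while not q.empty():
--         idx, data = q.get()
--
--         if pq[0] == data:
--             time += 1
--
--             if idx == k:
--             	return time
--
--             heapq.heappop(pq)
--             heapq._heapify_max(pq)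
--
--         if pq[0] != data:
--             q.put([idx, data])
-- ===== SOURCE B (Python) =====
-- def buyTicket(arr, n, k):
--     # Processes whole priority classes per pass instead of simulating a heap-backed queue.
--     if not arr:
--         return 0
--     people = [(i, arr[i]) for i in range(n)]
--     time = 0
--     while people:
--         m = max(v for _, v in people)
--         rest = []
--         last = None
--         for idx, v in people:
--             if v == m:
--                 time += 1
--                 if idx == k:
--                     return time
--                 last = len(rest)
--             else:
--                 rest.append((idx, v))
--         people = rest[last:] + rest[:last] if last is not None else rest
-- ===== Notes on version B (the rewrite author's own statement) =====
-- stated objective: alternative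
-- what changed: B drops the heap (with its per-operation _heapify_max rebuild) and the element-by-element requeue simulation: it serves one whole priority class per pass over the remaining people and rotates the survivors at the position of the last served person, which provably reproduces the queue's cyclic serving order.
import Mathlib
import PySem

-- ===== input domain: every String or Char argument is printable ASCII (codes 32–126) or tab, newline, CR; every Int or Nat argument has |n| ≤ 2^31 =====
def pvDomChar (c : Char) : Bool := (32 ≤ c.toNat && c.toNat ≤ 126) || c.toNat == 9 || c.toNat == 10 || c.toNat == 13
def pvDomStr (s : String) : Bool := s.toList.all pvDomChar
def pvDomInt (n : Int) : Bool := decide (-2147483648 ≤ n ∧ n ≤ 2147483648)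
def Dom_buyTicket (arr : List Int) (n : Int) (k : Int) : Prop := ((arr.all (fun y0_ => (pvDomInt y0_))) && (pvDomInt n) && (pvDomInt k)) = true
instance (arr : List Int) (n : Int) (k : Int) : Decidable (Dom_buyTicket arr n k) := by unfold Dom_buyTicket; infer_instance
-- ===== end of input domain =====

-- B serves one whole priority class per pass over the remaining people and rotates the
-- survivors at the last served position, instead of A's heap-backed element-by-element
-- queue simulation with requeues (objective: alternative algorithm; return value only).

-- ===== PORT A =====
-- A's heapq list pq is modelled as the multiset of its elements: after every
-- `_heapify_max`, `pq[0]` is the maximum (PySem.List.max? with identity key), and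
-- `heappop` removes one occurrence of that maximum (List.erase).  The queue.Queue is a
-- FIFO list.  The `while` loop gets fuel 2*(n+1)^2; the proof shows the loop needs at
-- most (n+1)^2 steps on every input Pre_ admits, so the fuel-out branch is never taken.
def buyTicketLoop (k : Int) : Nat → List Int → List (Int × Int) → Int → Int
  | 0, _, _, _ => 0                 -- fuel out (never reached under Pre_)
  | fuel+1, pq, q, time =>
    match q with
    | [] => 0                       -- Python falls off the loop and returns None (excluded by Pre_)
    | (idx, data) :: rest =>
      match PySem.List.max? pq (fun v => v) with
      | none => 0                   -- pq[0] on an empty heap raises IndexError (excluded by Pre_)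
      | some m =>
        if m = data then
          if idx = k then time + 1
          else
            match PySem.List.max? (pq.erase m) (fun v => v) with
            | none => 0             -- pq[0] after the pop raises IndexError (excluded by Pre_)
            | some m' =>
              if m' ≠ data then buyTicketLoop k fuel (pq.erase m) (rest ++ [(idx, data)]) (time + 1)
              else buyTicketLoop k fuel (pq.erase m) rest (time + 1)
        else
          buyTicketLoop k fuel pq (rest ++ [(idx, data)]) time

def buyTicket (arr : List Int) (n : Int) (k : Int) : Int :=
  if arr = [] then 0
  else
    buyTicketLoop k (2 * (n.toNat + 1) * (n.toNat + 1))
      ((List.range n.toNat).map (fun (i : Nat) => arr.getD i 0))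
      ((List.range n.toNat).map (fun (i : Nat) => ((i : Int), arr.getD i 0)))
      0

-- ===== PORT B =====
-- one sweep of Source B's inner for-loop: serves every entry of the current maximal
-- priority m, accumulating the survivors in `rest` and the cut position in `last`
def altPhase (k m : Int) : List (Int × Int) → Int → List (Int × Int) → Option Nat →
    Sum Int (List (Int × Int) × Option Nat × Int)
  | [], time, rest, last => Sum.inr (rest, last, time)
  | (idx, v) :: ps, time, rest, last =>
    if v = m then
      if idx = k then Sum.inl (time + 1)
      else altPhase k m ps (time + 1) rest (some rest.length)
    else altPhase k m ps time (rest ++ [(idx, v)]) last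

-- Source B's while-loop; fuel n+1 suffices since every pass shortens `people`
def altLoop (k : Int) : Nat → List (Int × Int) → Int → Int
  | 0, _, _ => 0                    -- fuel out (never reached under Pre_)
  | fuel+1, people, time =>
    match people with
    | [] => 0                       -- Python falls off the loop and returns None (excluded by Pre_)
    | _ :: _ =>
      match PySem.List.max? (people.map Prod.snd) (fun v => v) with
      | none => 0                   -- unreachable: people is nonempty
      | some m =>
        match altPhase k m people time [] none with
        | Sum.inl t => t
        | Sum.inr (rest, last, time') =>
          altLoop k fuel
            (match last with
             | some l => rest.drop l ++ rest.take l
             | none => rest) time'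

def buyTicket_alt (arr : List Int) (n : Int) (k : Int) : Int :=
  if arr = [] then 0
  else
    altLoop k (n.toNat + 1)
      ((List.range n.toNat).map (fun (i : Nat) => ((i : Int), arr.getD i 0))) 0

-- ===== PRECONDITION & SPEC =====
-- Pre_ excludes exactly the inputs where Python A does not return an int: with a nonempty
-- arr and n ≤ 0 the while loop never runs and A returns None, and with k < 0, k ≥ n or
-- n > len(arr) A raises IndexError.
def Pre_buyTicket (arr : List Int) (n : Int) (k : Int) : Prop :=
  arr = [] ∨ (0 ≤ k ∧ k < n ∧ n ≤ (arr.length : Int))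
instance (arr : List Int) (n : Int) (k : Int) : Decidable (Pre_buyTicket arr n k) := by
  unfold Pre_buyTicket; infer_instance

def pvWitness_buyTicket : List Int × Int × Int := ([3, 1, 2, 1], 4, 2)

def Spec_buyTicket (arr : List Int) (n : Int) (k : Int) (out : Int) : Prop := out = buyTicket_alt arr n k
instance (arr : List Int) (n : Int) (k : Int) (out : Int) : Decidable (Spec_buyTicket arr n k out) := by unfold Spec_buyTicket; infer_instance

-- ===== CLAIM (what is proved, stated in full; the proofs are below) =====
def Claim_equal_buyTicket : Prop := ∀ (arr : List Int) (n : Int) (k : Int), Dom_buyTicket arr n k → Pre_buyTicket arr n k → Spec_buyTicket arr n k (buyTicket arr n k)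

-- ===== LEMMAS AND PROOFS =====

-- max of the second components (the value Python's max() computes in Source B)
def pvMx (q : List (Int × Int)) : Option Int := PySem.List.max? (q.map Prod.snd) (fun v => v)

-- the real (still unserved) entries of A's queue: those whose value is still in the heap
def pvClean (pq : List Int) (q : List (Int × Int)) : List (Int × Int) :=
  q.filter (fun e => decide (e.2 ∈ pq))

-- reference small-step simulation (no heap, no ghost entries), Option-valued
def pvSim (k : Int) : Nat → List (Int × Int) → Int → Option Int
  | 0, _, _ => none
  | fuel+1, q, time =>
    match q with
    | [] => none
    | (i, v) :: rest =>
      if pvMx q = some v then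
        if i = k then some (time + 1)
        else pvSim k fuel rest (time + 1)
      else pvSim k fuel (rest ++ [(i, v)]) time

-- A-loop invariant: the heap is the multiset of values of the real entries, and every
-- ghost entry's value is strictly above everything in the heap
def pvInv (pq : List Int) (q : List (Int × Int)) : Prop :=
  pq.Perm ((pvClean pq q).map Prod.snd) ∧ ∀ e ∈ q, e.2 ∈ pq ∨ ∀ x ∈ pq, x < e.2

-- person k is still waiting, for real
def pvKP (k : Int) (pq : List Int) (q : List (Int × Int)) : Prop :=
  ∃ v, (k, v) ∈ q ∧ v ∈ pq

-- step budget of A's loop from a given state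
def pvMu (pq : List Int) (q : List (Int × Int)) : Nat :=
  pq.length * (q.length + 1) +
    q.findIdx (fun e => PySem.List.max? pq (fun v => v) == some e.2) + 1


-- max(): specification and congruence under permutation
theorem pvMax_spec {l : List Int} {m : Int}
    (h : PySem.List.max? l (fun v => v) = some m) : m ∈ l ∧ ∀ y ∈ l, y ≤ m :=
  ⟨PySem.List.max?_mem h, PySem.List.max?_isMax h⟩

theorem pvMax_unique {l : List Int} {m : Int} (hm : m ∈ l) (hmax : ∀ y ∈ l, y ≤ m) :
    PySem.List.max? l (fun v => v) = some m := by
  cases h : PySem.List.max? l (fun v => v) with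
  | none => rw [PySem.List.max?_eq_none_iff] at h; subst h; simp at hm
  | some m' =>
    have h1 := PySem.List.max?_mem h
    have h2 := PySem.List.max?_isMax (κ := Int) h
    have : m' = m := le_antisymm (hmax _ h1) (h2 _ hm)
    rw [this]

theorem pvMax_perm {l l' : List Int} (hp : l.Perm l') {m : Int}
    (h : PySem.List.max? l (fun v => v) = some m) :
    PySem.List.max? l' (fun v => v) = some m := by
  obtain ⟨h1, h2⟩ := pvMax_spec h
  exact pvMax_unique (hp.mem_iff.mp h1) (fun y hy => h2 y (hp.mem_iff.mpr hy))

theorem pvFindIdx_append {α : Type} (p : α → Bool) (l₁ l₂ : List α)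
    (h : List.findIdx p l₁ < l₁.length) :
    List.findIdx p (l₁ ++ l₂) = List.findIdx p l₁ := by
  induction l₁ with
  | nil => simp at h
  | cons a t ih =>
    by_cases hp : p a
    · simp [List.findIdx_cons, hp]
    · simp only [List.findIdx_cons, hp, cond_false, List.length_cons, List.cons_append] at h ⊢
      have := ih (by omega)
      omega

-- ===== the A side: the heap/requeue loop equals the clean small-step simulation =====

theorem pvMainA (k : Int) : ∀ fuel pq q time t F,
    pvInv pq q → pvKP k pq q →
    pvSim k F (pvClean pq q) time = some t →
    pvMu pq q ≤ fuel →
    buyTicketLoop k fuel pq q time = t := by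
  intro fuel
  induction fuel with
  | zero =>
    intro pq q time t F _ _ _ hmu
    exfalso; simp [pvMu] at hmu
  | succ f ih =>
    intro pq q time t F hinv hkp hsim hmu
    obtain ⟨hperm, hghost⟩ := hinv
    obtain ⟨vk, hvkq, hvkpq⟩ := hkp
    cases q with
    | nil => simp at hvkq
    | cons e rest =>
      obtain ⟨idx, data⟩ := e
      obtain ⟨m, hmx⟩ : ∃ m, PySem.List.max? pq (fun v => v) = some m := by
        cases h : PySem.List.max? pq (fun v => v) with
        | none => rw [PySem.List.max?_eq_none_iff] at h; subst h; simp at hvkpq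
        | some m => exact ⟨m, rfl⟩
      have hmmem : m ∈ pq := (pvMax_spec hmx).1
      have hmmax : ∀ y ∈ pq, y ≤ m := (pvMax_spec hmx).2
      -- a servable (real, maximal) entry exists in the queue
      have hserv : ∃ es ∈ (idx, data) :: rest,
          (PySem.List.max? pq (fun v => v) == some es.2) = true := by
        have hmm : m ∈ (pvClean pq ((idx, data) :: rest)).map Prod.snd := hperm.mem_iff.mp hmmem
        obtain ⟨es, hes, hsnd⟩ := List.mem_map.mp hmm
        exact ⟨es, List.mem_of_mem_filter hes, by simp [hmx, hsnd]⟩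
      have hplt := List.findIdx_lt_length_of_exists hserv
      obtain ⟨P', hP'⟩ : ∃ P', pq.length = P' + 1 :=
        ⟨pq.length - 1, by have := List.length_pos_of_mem hmmem; omega⟩
      by_cases hmd : m = data
      · -- SERVE: the front holds the maximal priority
        have hdatapq : data ∈ pq := hmd ▸ hmmem
        have hclean : pvClean pq ((idx, data) :: rest) = (idx, data) :: pvClean pq rest := by
          simp [pvClean, List.filter_cons, hdatapq]
        have hmxclean : pvMx ((idx, data) :: pvClean pq rest) = some data := by
          have h1 := pvMax_perm hperm hmx
          rw [hclean] at h1
          exact hmd ▸ h1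
        rw [hclean] at hsim
        cases F with
        | zero => simp [pvSim] at hsim
        | succ F' =>
          rw [pvSim] at hsim
          by_cases hik : idx = k
          · -- k is served: both sides return time + 1
            rw [hik] at hmxclean
            simp only [hik] at hsim
            rw [hmxclean] at hsim
            simp at hsim
            rw [buyTicketLoop, hmx]
            simp [hmd, hik, hsim]
          · simp only [hmxclean, if_pos rfl, if_neg hik] at hsim
            simp only [if_true] at hsim
            -- A pops the maximum from the heap
            have hsub : ∀ x ∈ pq.erase m, x ∈ pq := fun x hx => List.mem_of_mem_erase hx
            have hle' : ∀ x ∈ pq.erase m, x ≤ m := fun x hx => hmmax x (hsub x hx)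
            have hvkrest : (k, vk) ∈ rest := by
              rcases List.mem_cons.mp hvkq with h | h
              · exfalso; exact hik (by injection h with h1 _; exact h1.symm)
              · exact h
            have hcntq : pq.count m = 1 + ((pvClean pq rest).map Prod.snd).count m := by
              rw [hperm.count_eq, hclean]
              simp [hmd, List.count_cons]
              omega
            -- the k entry survives the pop
            have hvk' : vk ∈ pq.erase m := by
              by_cases hvm : vk = m
              · subst hvm
                have hkclean : (k, vk) ∈ pvClean pq rest :=
                  List.mem_filter.mpr ⟨hvkrest, by simp [hvkpq]⟩
                have h1 : 0 < ((pvClean pq rest).map Prod.snd).count vk :=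
                  List.count_pos_iff.mpr (List.mem_map.mpr ⟨(k, vk), hkclean, rfl⟩)
                apply List.count_pos_iff.mp
                rw [List.count_erase_self]
                omega
              · exact (List.mem_erase_of_ne hvm).mpr hvkpq
            have hpq'ne : pq.erase m ≠ [] := List.ne_nil_of_mem hvk'
            obtain ⟨m', hmx'⟩ : ∃ m', PySem.List.max? (pq.erase m) (fun v => v) = some m' := by
              cases h : PySem.List.max? (pq.erase m) (fun v => v) with
              | none => rw [PySem.List.max?_eq_none_iff] at h; exact absurd h hpq'ne
              | some m' => exact ⟨m', rfl⟩
            have hm'mem : m' ∈ pq.erase m := PySem.List.max?_mem hmx'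
            have hm'le : m' ≤ m := hle' _ hm'mem
            have hm'max : ∀ y ∈ pq.erase m, y ≤ m' := PySem.List.max?_isMax (κ := Int) hmx'
            have hmemiff : m ∈ pq.erase m ↔ m' = m := by
              constructor
              · intro hmm'; exact le_antisymm hm'le (hm'max _ hmm')
              · intro h; exact h ▸ hm'mem
            -- values of m vanish from the tail exactly when the heap lost its last m
            have hnom : ¬ (m' = m) → ∀ e ∈ rest, e.2 ≠ m := by
              intro hm'm e he hvm
              have hnm : m ∉ pq.erase m := fun hc => hm'm (hmemiff.mp hc)
              have hc0 : (pq.erase m).count m = 0 := List.count_eq_zero.mpr hnm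
              rw [List.count_erase_self] at hc0
              rcases hghost e (List.mem_cons_of_mem _ he) with hreal | hgh
              · have he1 : e ∈ pvClean pq rest := List.mem_filter.mpr ⟨he, by simp [hreal]⟩
                have h1 : 0 < ((pvClean pq rest).map Prod.snd).count m :=
                  List.count_pos_iff.mpr (List.mem_map.mpr ⟨e, he1, hvm⟩)
                omega
              · have := hgh m hmmem; omega
            -- the cleaned tail is unchanged by the pop
            have hcleq : pvClean (pq.erase m) rest = pvClean pq rest := by
              apply List.filter_congr
              intro e he
              by_cases hvm : e.2 = m
              · by_cases hm'm : m' = m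
                · simp [hvm, hmemiff.mpr hm'm, hmmem]
                · exact absurd hvm (hnom hm'm e he)
              · simp [List.mem_erase_of_ne hvm]
            have hpermpop : (pq.erase m).Perm ((pvClean pq rest).map Prod.snd) := by
              have h1 := hperm.erase m
              rw [hclean] at h1
              simpa [hmd] using h1
            have hperm' : (pq.erase m).Perm ((pvClean (pq.erase m) rest).map Prod.snd) := by
              rw [hcleq]; exact hpermpop
            have hghostrest : ∀ e ∈ rest, e.2 ∈ pq.erase m ∨ ∀ x ∈ pq.erase m, x < e.2 := by
              intro e he
              rcases hghost e (List.mem_cons_of_mem _ he) with hreal | hgh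
              · by_cases hvm : e.2 = m
                · by_cases hm'm : m' = m
                  · exact Or.inl (hvm ▸ hmemiff.mpr hm'm)
                  · exact absurd hvm (hnom hm'm e he)
                · exact Or.inl ((List.mem_erase_of_ne hvm).mpr hreal)
              · exact Or.inr (fun x hx => hgh x (hsub x hx))
            have hkp' : pvKP k (pq.erase m) rest := ⟨vk, hvkrest, hvk'⟩
            have hserv' : ∃ es ∈ rest,
                (PySem.List.max? (pq.erase m) (fun v => v) == some es.2) = true := by
              have hmm : m' ∈ (pvClean (pq.erase m) rest).map Prod.snd :=
                hperm'.mem_iff.mp hm'mem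
              obtain ⟨es, hes, hsnd⟩ := List.mem_map.mp hmm
              exact ⟨es, List.mem_of_mem_filter hes, by simp [hmx', hsnd]⟩
            have hlenerase : (pq.erase m).length = P' := by
              rw [List.length_erase_of_mem hmmem, hP']
              omega
            have hmuexp : (P' + 1) * (rest.length + 1 + 1) +
                List.findIdx (fun e => PySem.List.max? pq (fun v => v) == some e.2)
                  ((idx, data) :: rest) + 1 ≤ f + 1 := by
              have := hmu
              unfold pvMu at this
              simpa [hP'] using this
            rw [buyTicketLoop, hmx]
            simp only [if_pos hmd, if_neg hik, hmx']
            by_cases hm'm : m' = m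
            · -- the heap still holds an m: no ghost is requeued
              have hcond : ¬ (m' ≠ data) := by simp [hm'm, hmd]
              simp only [if_neg hcond]
              apply ih (pq.erase m) rest (time + 1) t F' ⟨hperm', hghostrest⟩ hkp'
              · rw [hcleq]; exact hsim
              · have hplt' := List.findIdx_lt_length_of_exists hserv'
                unfold pvMu
                rw [hlenerase]
                have e1 : (P' + 1) * (rest.length + 1) + (P' + 1) =
                    (P' + 1) * (rest.length + 1 + 1) := by ring
                have e2 : P' * (rest.length + 1) + (rest.length + 1) =
                    (P' + 1) * (rest.length + 1) := by ring
                omega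
            · -- the heap lost its last m: the served person is requeued as a ghost
              have hcond : (m' ≠ data) := fun h => hm'm (h.trans hmd.symm)
              simp only [if_pos hcond]
              have hghlast : ∀ x ∈ pq.erase m, x < data := by
                intro x hx
                have h1 : x ≤ m := hle' x hx
                have h2 : x ≠ m := fun hxe => hm'm (hmemiff.mp (hxe ▸ hx))
                omega
              have hdnotin : data ∉ pq.erase m := fun hc => absurd rfl (hghlast data hc).ne
              have hclean2 : pvClean (pq.erase m) (rest ++ [(idx, data)]) =
                  pvClean (pq.erase m) rest := by
                simp [pvClean, List.filter_append, hdnotin]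
              have hghost2 : ∀ e ∈ rest ++ [(idx, data)],
                  e.2 ∈ pq.erase m ∨ ∀ x ∈ pq.erase m, x < e.2 := by
                intro e he
                rcases List.mem_append.mp he with h | h
                · exact hghostrest e h
                · rcases List.mem_singleton.mp h with rfl
                  exact Or.inr hghlast
              have hperm2 : (pq.erase m).Perm
                  ((pvClean (pq.erase m) (rest ++ [(idx, data)])).map Prod.snd) := by
                rw [hclean2]; exact hperm'
              apply ih (pq.erase m) (rest ++ [(idx, data)]) (time + 1) t F'
                ⟨hperm2, hghost2⟩ ⟨vk, List.mem_append_left _ hvkrest, hvk'⟩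
              · rw [hclean2, hcleq]; exact hsim
              · obtain ⟨es, hes, hpes⟩ := hserv'
                have hserv2 : ∃ es ∈ rest ++ [(idx, data)],
                    (PySem.List.max? (pq.erase m) (fun v => v) == some es.2) = true :=
                  ⟨es, List.mem_append_left _ hes, hpes⟩
                have hplt' := List.findIdx_lt_length_of_exists hserv2
                unfold pvMu
                rw [hlenerase]
                simp only [List.length_append, List.length_cons, List.length_nil,
                  Nat.zero_add] at hplt' ⊢
                have e1 : P' * (rest.length + 1 + 1) + (rest.length + 1 + 1) =
                    (P' + 1) * (rest.length + 1 + 1) := by ring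
                omega
      · -- REQUEUE: the front is not maximal (a low-priority person or a ghost)
        have hfrontfalse : (PySem.List.max? pq (fun v => v) == some data) = false := by
          simp [hmx, hmd]
        have hp : List.findIdx (fun e => PySem.List.max? pq (fun v => v) == some e.2)
            ((idx, data) :: rest) =
            List.findIdx (fun e => PySem.List.max? pq (fun v => v) == some e.2) rest + 1 := by
          simp [List.findIdx_cons, hfrontfalse]
        obtain ⟨es, hes, hpes⟩ := hserv
        have hesrest : es ∈ rest := by
          rcases List.mem_cons.mp hes with h | h
          · exfalso; rw [h] at hpes; rw [hfrontfalse] at hpes; exact Bool.false_ne_true hpes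
          · exact h
        have hpltrest : List.findIdx (fun e => PySem.List.max? pq (fun v => v) == some e.2)
            rest < rest.length :=
          List.findIdx_lt_length_of_exists ⟨es, hesrest, hpes⟩
        have hpapp : List.findIdx (fun e => PySem.List.max? pq (fun v => v) == some e.2)
            (rest ++ [(idx, data)]) =
            List.findIdx (fun e => PySem.List.max? pq (fun v => v) == some e.2) rest :=
          pvFindIdx_append _ _ _ hpltrest
        have hghost2 : ∀ e ∈ rest ++ [(idx, data)], e.2 ∈ pq ∨ ∀ x ∈ pq, x < e.2 := by
          intro e he
          rcases List.mem_append.mp he with h | h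
          · exact hghost e (List.mem_cons_of_mem _ h)
          · rcases List.mem_singleton.mp h with rfl
            exact hghost _ List.mem_cons_self
        have hkp2 : pvKP k pq (rest ++ [(idx, data)]) := by
          refine ⟨vk, ?_, hvkpq⟩
          rcases List.mem_cons.mp hvkq with h | h
          · exact List.mem_append_right _ (h ▸ List.mem_singleton.mpr rfl)
          · exact List.mem_append_left _ h
        rw [buyTicketLoop, hmx]
        simp only [if_neg hmd]
        rcases hghost (idx, data) List.mem_cons_self with hreal | hgh
        · -- a real low-priority person is requeued; the simulation steps with it
          have hclean : pvClean pq ((idx, data) :: rest) = (idx, data) :: pvClean pq rest := by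
            simp [pvClean, List.filter_cons, hreal]
          have hmxclean : pvMx ((idx, data) :: pvClean pq rest) = some m := by
            have h1 := pvMax_perm hperm hmx
            rw [hclean] at h1
            exact h1
          have hcleanapp : pvClean pq (rest ++ [(idx, data)]) =
              pvClean pq rest ++ [(idx, data)] := by
            simp [pvClean, List.filter_append, List.filter_cons, hreal]
          rw [hclean] at hsim
          cases F with
          | zero => simp [pvSim] at hsim
          | succ F' =>
            rw [pvSim] at hsim
            have hne : ¬ (pvMx ((idx, data) :: pvClean pq rest) = some data) := by
              rw [hmxclean]; simp [hmd]
            simp only [hne, if_neg hne] at hsim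
            have hperm2 : pq.Perm ((pvClean pq (rest ++ [(idx, data)])).map Prod.snd) := by
              rw [hcleanapp, List.map_append]
              have h0 : pq.Perm (data :: (pvClean pq rest).map Prod.snd) := by
                have h1 := hperm
                rw [hclean] at h1
                simpa using h1
              exact h0.trans (List.perm_append_singleton _ _).symm
            apply ih pq (rest ++ [(idx, data)]) time t F' ⟨hperm2, hghost2⟩ hkp2
            · rw [hcleanapp]; exact hsim
            · unfold pvMu
              rw [hP']
              simp only [List.length_append, List.length_cons, List.length_nil, Nat.zero_add, hpapp]
              unfold pvMu at hmu
              rw [hP', hp] at hmu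
              simp only [List.length_cons] at hmu
              omega
        · -- a ghost is requeued: the simulation does not move
          have hdnotin : data ∉ pq := fun hc => absurd rfl (hgh data hc).ne
          have hclean : pvClean pq ((idx, data) :: rest) = pvClean pq rest := by
            simp [pvClean, List.filter_cons, hdnotin]
          have hcleanapp : pvClean pq (rest ++ [(idx, data)]) = pvClean pq rest := by
            simp [pvClean, List.filter_append, List.filter_cons, hdnotin]
          have hperm2 : pq.Perm ((pvClean pq (rest ++ [(idx, data)])).map Prod.snd) := by
            rw [hcleanapp, ← hclean]; exact hperm
          apply ih pq (rest ++ [(idx, data)]) time t F ⟨hperm2, hghost2⟩ hkp2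
          · rw [hcleanapp, ← hclean]; exact hsim
          · unfold pvMu
            rw [hP']
            simp only [List.length_append, List.length_cons, List.length_nil, Nat.zero_add, hpapp]
            unfold pvMu at hmu
            rw [hP', hp] at hmu
            simp only [List.length_cons] at hmu
            omega



-- ===== the B side: the pass/rotation loop equals the clean small-step simulation =====

theorem pvPhase_noserve (k m : Int) : ∀ ps time rest last, (∀ e ∈ ps, e.2 ≠ m) →
    altPhase k m ps time rest last = Sum.inr (rest ++ ps, last, time) := by
  intro ps
  induction ps with
  | nil => intro time rest last _; simp [altPhase]
  | cons e t ih =>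
    intro time rest last h
    obtain ⟨i, v⟩ := e
    have hv : ¬ (v = m) := h _ List.mem_cons_self
    rw [altPhase, if_neg hv, ih _ _ _ (fun e he => h e (List.mem_cons_of_mem _ he))]
    simp

theorem pvPhase_len (k m : Int) : ∀ ps time rest last r l' t',
    altPhase k m ps time rest last = Sum.inr (r, l', t') →
    r.length ≤ ps.length + rest.length ∧
      (m ∈ ps.map Prod.snd → r.length < ps.length + rest.length) := by
  intro ps
  induction ps with
  | nil =>
    intro time rest last r l' t' h
    rw [altPhase] at h
    simp only [Sum.inr.injEq, Prod.mk.injEq] at h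
    obtain ⟨rfl, -, -⟩ := h
    exact ⟨by simp, by intro hm; simp at hm⟩
  | cons e t ih =>
    intro time rest last r l' t' h
    obtain ⟨i, v⟩ := e
    by_cases hv : v = m
    · rw [altPhase, if_pos hv] at h
      by_cases hik : i = k
      · rw [if_pos hik] at h; exact absurd h (by simp)
      · rw [if_neg hik] at h
        obtain ⟨h1, -⟩ := ih _ _ _ _ _ _ h
        constructor
        · simp; omega
        · intro _; simp; omega
    · rw [altPhase, if_neg hv] at h
      obtain ⟨h1, h2⟩ := ih _ _ _ _ _ _ h
      simp at h1
      constructor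
      · simp; omega
      · intro hm
        rcases (by simpa using hm : m = v ∨ ∃ a, (a, m) ∈ t) with hmv | ⟨a, hmt⟩
        · exact absurd hmv.symm hv
        · have := h2 (List.mem_map.mpr ⟨(a, m), hmt, rfl⟩)
          simp at this ⊢
          omega

theorem pvPhase_kmem (k m : Int) : ∀ ps time rest last r l' t',
    altPhase k m ps time rest last = Sum.inr (r, l', t') →
    ∀ v', ((k, v') ∈ ps ∨ (k, v') ∈ rest) → (k, v') ∈ r := by
  intro ps
  induction ps with
  | nil =>
    intro time rest last r l' t' h v' hv'
    rw [altPhase] at h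
    injection h with h1
    have hr : rest = r := congrArg (fun x => x.1) h1
    rcases hv' with h2 | h2
    · simp at h2
    · exact hr ▸ h2
  | cons e t ih =>
    intro time rest last r l' t' h v' hv'
    obtain ⟨i, v⟩ := e
    by_cases hv : v = m
    · rw [altPhase, if_pos hv] at h
      by_cases hik : i = k
      · rw [if_pos hik] at h; exact absurd h (by simp)
      · rw [if_neg hik] at h
        apply ih _ _ _ _ _ _ h
        rcases hv' with h2 | h2
        · rcases List.mem_cons.mp h2 with h3 | h3
          · exact absurd (congrArg Prod.fst h3).symm (by simpa using hik)
          · exact Or.inl h3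
        · exact Or.inr h2
    · rw [altPhase, if_neg hv] at h
      apply ih _ _ _ _ _ _ h
      rcases hv' with h2 | h2
      · rcases List.mem_cons.mp h2 with h3 | h3
        · exact Or.inr (List.mem_append_right _ (h3 ▸ List.mem_singleton.mpr rfl))
        · exact Or.inl h3
      · exact Or.inr (List.mem_append_left _ h2)

theorem pvPhase_last (k m : Int) : ∀ ps time rest last r l' t',
    (match last with
     | some l₀ => l₀ ≤ rest.length
     | none => m ∈ ps.map Prod.snd) →
    altPhase k m ps time rest last = Sum.inr (r, l', t') →
    ∃ l, l' = some l ∧ l ≤ r.length := by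
  intro ps
  induction ps with
  | nil =>
    intro time rest last r l' t' hpre h
    rw [altPhase] at h
    injection h with h1
    have hr : rest = r := congrArg (fun x => x.1) h1
    have hl : last = l' := congrArg (fun x => x.2.1) h1
    cases last with
    | none => simp at hpre
    | some l₀ => exact ⟨l₀, hl ▸ rfl, hr ▸ hpre⟩
  | cons e t ih =>
    intro time rest last r l' t' hpre h
    obtain ⟨i, v⟩ := e
    by_cases hv : v = m
    · rw [altPhase, if_pos hv] at h
      by_cases hik : i = k
      · rw [if_pos hik] at h; exact absurd h (by simp)
      · rw [if_neg hik] at h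
        exact ih _ _ _ _ _ _ (by simp) h
    · rw [altPhase, if_neg hv] at h
      apply ih _ _ _ _ _ _ ?_ h
      cases last with
      | some l₀ => simp; omega
      | none =>
        rcases (by simpa using hpre : m = v ∨ ∃ a, (a, m) ∈ t) with h3 | ⟨a, h3⟩
        · exact absurd h3.symm hv
        · exact List.mem_map.mpr ⟨(a, m), h3, rfl⟩

-- one pass of Source B = a run of simulation steps
theorem pvPhase_sim (k m : Int) : ∀ ps rest time last0,
    (∀ e ∈ ps, e.2 ≤ m) → (∀ e ∈ rest, e.2 < m) → m ∈ ps.map Prod.snd →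
    (∀ t, altPhase k m ps time rest last0 = Sum.inl t →
        ∃ F, pvSim k F (ps ++ rest) time = some t) ∧
    (∀ r l t' G t, altPhase k m ps time rest last0 = Sum.inr (r, some l, t') →
        pvSim k G (r.drop l ++ r.take l) t' = some t →
        ∃ F, pvSim k F (ps ++ rest) time = some t) := by
  intro ps
  induction ps with
  | nil => intro rest time last0 _ _ hm; simp at hm
  | cons e t ih =>
    intro rest time last0 hps hrest hm
    obtain ⟨i, v⟩ := e
    have hball : ∀ y ∈ ((i, v) :: (t ++ rest)).map Prod.snd, y ≤ m := by
      intro y hy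
      obtain ⟨ee, hee, rfl⟩ := List.mem_map.mp hy
      rcases List.mem_cons.mp hee with h1 | h1
      · exact hps _ (h1 ▸ List.mem_cons_self)
      · rcases List.mem_append.mp h1 with h2 | h2
        · exact hps _ (List.mem_cons_of_mem _ h2)
        · exact le_of_lt (hrest _ h2)
    have hmmem : m ∈ ((i, v) :: (t ++ rest)).map Prod.snd := by
      obtain ⟨ee, hee, hsnd⟩ := List.mem_map.mp hm
      have hee2 : ee ∈ (i, v) :: (t ++ rest) := by
        rcases List.mem_cons.mp hee with h1 | h1
        · simp [h1]
        · exact List.mem_cons_of_mem _ (List.mem_append_left _ h1)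
      exact List.mem_map.mpr ⟨ee, hee2, hsnd⟩
    have hmxq : pvMx ((i, v) :: (t ++ rest)) = some m := pvMax_unique hmmem hball
    by_cases hv : v = m
    · subst hv
      by_cases hik : i = k
      · -- k is served in this pass
        subst hik
        constructor
        · intro t₀ h
          rw [altPhase, if_pos rfl, if_pos rfl] at h
          injection h with h1
          refine ⟨1, ?_⟩
          rw [List.cons_append]
          conv_lhs => rw [pvSim.eq_def]
          simp [hmxq, h1]
        · intro r l t' G t₀ h
          rw [altPhase, if_pos rfl, if_pos rfl] at h
          exact absurd h (by simp)
      · -- someone else with priority v is served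
        have hstep : ∀ (F : ℕ) (tm : Int),
            pvSim k (F + 1) ((i, v) :: (t ++ rest)) tm = pvSim k F (t ++ rest) (tm + 1) := by
          intro F tm
          conv_lhs => rw [pvSim.eq_def]
          simp [hmxq, hik]
        by_cases hm2 : v ∈ t.map Prod.snd
        · obtain ⟨ih1, ih2⟩ := ih rest (time + 1) (some rest.length)
            (fun e he => hps e (List.mem_cons_of_mem _ he)) hrest hm2
          constructor
          · intro t₀ h
            rw [altPhase, if_pos rfl, if_neg hik] at h
            obtain ⟨F, hF⟩ := ih1 t₀ h
            exact ⟨F + 1, by rw [List.cons_append, hstep]; exact hF⟩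
          · intro r l t' G t₀ h hG
            rw [altPhase, if_pos rfl, if_neg hik] at h
            obtain ⟨F, hF⟩ := ih2 r l t' G t₀ h hG
            exact ⟨F + 1, by rw [List.cons_append, hstep]; exact hF⟩
        · -- this was the last person of the served priority: only requeues from here on
          have hnom : ∀ e ∈ t, e.2 ≠ v := by
            intro e he hc
            exact hm2 (List.mem_map.mpr ⟨e, he, hc⟩)
          have hph : altPhase k v t (time + 1) rest (some rest.length) =
              Sum.inr (rest ++ t, some rest.length, time + 1) :=
            pvPhase_noserve k v t (time + 1) rest (some rest.length) hnom
          constructor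
          · intro t₀ h
            rw [altPhase, if_pos rfl, if_neg hik, hph] at h
            exact absurd h (by simp)
          · intro r l t' G t₀ h hG
            rw [altPhase, if_pos rfl, if_neg hik, hph] at h
            injection h with h1
            have hr : rest ++ t = r := congrArg (fun x => x.1) h1
            have hl : (some rest.length : Option Nat) = some l := congrArg (fun x => x.2.1) h1
            have ht' : time + 1 = t' := congrArg (fun x => x.2.2) h1
            have hl2 : rest.length = l := by injection hl
            rw [← hr, ← hl2, List.drop_left, List.take_left, ← ht'] at hG
            exact ⟨G + 1, by rw [List.cons_append, hstep]; exact hG⟩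
    · -- a lower-priority person is passed over
      have hvm : v < m := lt_of_le_of_ne (hps _ List.mem_cons_self) hv
      have hstep : ∀ (F : ℕ),
          pvSim k (F + 1) ((i, v) :: (t ++ rest)) time =
            pvSim k F (t ++ (rest ++ [(i, v)])) time := by
        intro F
        conv_lhs => rw [pvSim.eq_def]
        have hne : ¬ (pvMx ((i, v) :: (t ++ rest)) = some v) := by
          rw [hmxq]; simp; omega
        simp [hne, List.append_assoc]
      have hrest' : ∀ e ∈ rest ++ [(i, v)], e.2 < m := by
        intro e he
        rcases List.mem_append.mp he with h1 | h1
        · exact hrest _ h1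
        · rcases List.mem_singleton.mp h1 with rfl; exact hvm
      have hm2 : m ∈ t.map Prod.snd := by
        rcases (by simpa using hm : m = v ∨ ∃ a, (a, m) ∈ t) with h3 | ⟨a, h3⟩
        · exact absurd h3.symm hv
        · exact List.mem_map.mpr ⟨(a, m), h3, rfl⟩
      obtain ⟨ih1, ih2⟩ := ih (rest ++ [(i, v)]) time last0
        (fun e he => hps e (List.mem_cons_of_mem _ he)) hrest' hm2
      constructor
      · intro t₀ h
        rw [altPhase, if_neg hv] at h
        obtain ⟨F, hF⟩ := ih1 t₀ h
        exact ⟨F + 1, by rw [List.cons_append, hstep]; exact hF⟩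
      · intro r l t' G t₀ h hG
        rw [altPhase, if_neg hv] at h
        obtain ⟨F, hF⟩ := ih2 r l t' G t₀ h hG
        exact ⟨F + 1, by rw [List.cons_append, hstep]; exact hF⟩

theorem pvAltLoop_sim (k : Int) : ∀ fb q time, q.length < fb → (∃ v, (k, v) ∈ q) →
    ∃ F, pvSim k F q time = some (altLoop k fb q time) := by
  intro fb
  induction fb with
  | zero => intro q time h _; omega
  | succ f ih =>
    intro q time hlen hkp
    obtain ⟨vk, hvk⟩ := hkp
    cases hq : q with
    | nil => rw [hq] at hvk; simp at hvk
    | cons e tq =>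
      subst hq
      obtain ⟨m, hmx⟩ : ∃ m, PySem.List.max? ((e :: tq).map Prod.snd) (fun v => v) = some m := by
        cases h : PySem.List.max? ((e :: tq).map Prod.snd) (fun v => v) with
        | none => rw [PySem.List.max?_eq_none_iff] at h; simp at h
        | some m => exact ⟨m, rfl⟩
      have hmm : m ∈ (e :: tq).map Prod.snd := PySem.List.max?_mem hmx
      have hball : ∀ x ∈ e :: tq, x.2 ≤ m := fun x hx =>
        PySem.List.max?_isMax (κ := Int) hmx _ (List.mem_map.mpr ⟨x, hx, rfl⟩)
      obtain ⟨ph1, ph2⟩ := pvPhase_sim k m (e :: tq) [] time none hball (by simp) hmm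
      cases hph : altPhase k m (e :: tq) time [] none with
      | inl t₀ =>
        obtain ⟨F, hF⟩ := ph1 t₀ hph
        refine ⟨F, ?_⟩
        rw [altLoop]
        simp only [hmx, hph]
        simpa using hF
      | inr res =>
        obtain ⟨r, l', t'⟩ := res
        obtain ⟨l, rfl, hlr⟩ := pvPhase_last k m (e :: tq) time [] none r l' t' hmm hph
        have hlen2 := pvPhase_len k m (e :: tq) time [] none r (some l) t' hph
        have hrlt : r.length < tq.length + 1 := by
          have := hlen2.2 hmm
          simpa using this
        have hkmem : (k, vk) ∈ r := pvPhase_kmem k m (e :: tq) time [] none r (some l) t' hph vk (Or.inl hvk)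
        have hrot : (k, vk) ∈ r.drop l ++ r.take l := by
          rw [← List.take_append_drop l r] at hkmem
          rcases List.mem_append.mp hkmem with h1 | h1
          · exact List.mem_append_right _ h1
          · exact List.mem_append_left _ h1
        have hrotlen : (r.drop l ++ r.take l).length < f := by
          simp only [List.length_append, List.length_drop, List.length_take]
          simp only [List.length_cons] at hlen
          omega
        obtain ⟨F₂, hF₂⟩ := ih (r.drop l ++ r.take l) t' hrotlen ⟨vk, hrot⟩
        obtain ⟨F, hF⟩ := ph2 r l t' F₂ (altLoop k f (r.drop l ++ r.take l) t') hph hF₂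
        refine ⟨F, ?_⟩
        rw [altLoop]
        simp only [hmx, hph]
        simpa using hF

-- ===== VERDICT (by name: the statement is the Claim_ definition above) =====
theorem buyTicket_spec : Claim_equal_buyTicket := by
  unfold Claim_equal_buyTicket
  intro arr n k hdom hpre
  unfold Spec_buyTicket buyTicket buyTicket_alt
  by_cases ha : arr = []
  · simp [ha]
  · rw [if_neg ha, if_neg ha]
    obtain ⟨hk0, hkn, hnl⟩ := hpre.resolve_left ha
    have hkN : k.toNat < n.toNat := by omega
    have hq0map : ((List.range n.toNat).map (fun (i : Nat) => ((i : Int), arr.getD i 0))).map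
        Prod.snd = (List.range n.toNat).map (fun (i : Nat) => arr.getD i 0) := by
      simp [List.map_map]
    have hclean0 : pvClean ((List.range n.toNat).map (fun (i : Nat) => arr.getD i 0))
        ((List.range n.toNat).map (fun (i : Nat) => ((i : Int), arr.getD i 0))) =
        (List.range n.toNat).map (fun (i : Nat) => ((i : Int), arr.getD i 0)) := by
      apply List.filter_eq_self.mpr
      intro e he
      simp only [decide_eq_true_eq]
      rw [← hq0map]
      exact List.mem_map.mpr ⟨e, he, rfl⟩
    have hkmem : (k, arr.getD k.toNat 0) ∈
        (List.range n.toNat).map (fun (i : Nat) => ((i : Int), arr.getD i 0)) :=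
      List.mem_map.mpr ⟨k.toNat, List.mem_range.mpr hkN, by
        simp [Int.toNat_of_nonneg hk0]⟩
    have hkpq : arr.getD k.toNat 0 ∈ (List.range n.toNat).map (fun (i : Nat) => arr.getD i 0) := by
      rw [← hq0map]
      exact List.mem_map.mpr ⟨_, hkmem, rfl⟩
    have hInv0 : pvInv ((List.range n.toNat).map (fun (i : Nat) => arr.getD i 0))
        ((List.range n.toNat).map (fun (i : Nat) => ((i : Int), arr.getD i 0))) := by
      constructor
      · rw [hclean0, hq0map]
      · intro e he
        refine Or.inl ?_
        rw [← hq0map]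
        exact List.mem_map.mpr ⟨e, he, rfl⟩
    obtain ⟨F, hF⟩ := pvAltLoop_sim k (n.toNat + 1)
      ((List.range n.toNat).map (fun (i : Nat) => ((i : Int), arr.getD i 0))) 0
      (by simp) ⟨arr.getD k.toNat 0, hkmem⟩
    apply pvMainA k _ _ _ 0 (altLoop k (n.toNat + 1)
      ((List.range n.toNat).map (fun (i : Nat) => ((i : Int), arr.getD i 0))) 0) F hInv0
      ⟨arr.getD k.toNat 0, hkmem, hkpq⟩
    · rw [hclean0]; exact hF
    · unfold pvMu
      have hlen1 : ((List.range n.toNat).map (fun (i : Nat) => arr.getD i 0)).length = n.toNat := by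
        simp
      have hlen2 : ((List.range n.toNat).map
          (fun (i : Nat) => ((i : Int), arr.getD i 0))).length = n.toNat := by simp
      rw [hlen1]
      have hple := List.findIdx_le_length
        (p := fun (e : Int × Int) => PySem.List.max?
          ((List.range n.toNat).map (fun (i : Nat) => arr.getD i 0))
          (fun v => v) == some e.2)
        (xs := (List.range n.toNat).map (fun (i : Nat) => ((i : Int), arr.getD i 0)))
      rw [hlen2] at hple
      have e1 : n.toNat * (n.toNat + 1) + (n.toNat + 1) = (n.toNat + 1) * (n.toNat + 1) := by ring
      have e2 : 2 * (n.toNat + 1) * (n.toNat + 1) =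
          (n.toNat + 1) * (n.toNat + 1) + (n.toNat + 1) * (n.toNat + 1) := by ring
      rw [hlen2]
      omega
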